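-- pv_equiv track=rewrite | github.com/temmie0232/CodingPractice | python/AOJ/ITP1/ITP1_8_D.py | jadge
-- ===== SOURCE A (Python) =====
-- def jadge(s,p):
--     list_s = list(s)
--     list_p = list(p)
--     # pの文字数
--     n = len(p)
--     # sの文字数回
--     for i in range(len(s)):
--         # 合ってる文字数
--         count = 0
--         # pの文字数回
--         for j in range(n):
--             # sとpの文字が一緒なら
--             if list_s[j] == list_p[j]:
--                 count += 1
--
--             # 違うなら次(sの変形)
--             else:
--                 break
--         # 先頭の文字を後ろに
--         if count == len(p):
--             return True
--         else:
--             head=list_s.pop(0)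
--             list_s.append(head)
-- ===== SOURCE B (Python) =====
-- def jadge(s, p):
--     # p matches some cyclic rotation's prefix of s  <=>  p occurs in s+s (for nonempty s)
--     if s and p in s + s:
--         return True
-- ===== Notes on version B (the rewrite author's own statement) =====
-- stated objective: faster
-- what changed: A rotates s character-by-character and compares each rotation against p in a nested Python loop; B does a single substring test 'p in s+s', using the classical fact that p is a prefix of some rotation of s iff p occurs in s+s.
-- crash fix: A raises IndexError when p is strictly longer than a nonempty s and some cyclic rotation of s is a prefix of p (the inner loop then indexes past the end of s); B returns None there. — e.g. on jadge("a", "ab"): A raises IndexError, B returns none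
import Mathlib
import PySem

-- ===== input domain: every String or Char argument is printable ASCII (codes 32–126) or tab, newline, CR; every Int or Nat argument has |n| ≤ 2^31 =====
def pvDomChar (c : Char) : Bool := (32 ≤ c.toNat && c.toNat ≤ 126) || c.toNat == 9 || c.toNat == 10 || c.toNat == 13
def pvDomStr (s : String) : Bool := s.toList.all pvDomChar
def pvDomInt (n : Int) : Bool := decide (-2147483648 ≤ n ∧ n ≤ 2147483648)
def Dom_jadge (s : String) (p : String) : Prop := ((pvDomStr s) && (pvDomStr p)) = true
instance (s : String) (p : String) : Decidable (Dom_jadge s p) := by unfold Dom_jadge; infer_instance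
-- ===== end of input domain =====

-- B replaces A's rotate-and-compare loop by a single substring test of p in s+s (same return, different algorithm).

-- ===== PORT A =====
-- inner loop: for j in range(n): if list_s[j]==list_p[j]: count+=1 else: break
-- (none = IndexError on list_s[j]; excluded by Pre_jadge)
def jadgeCount (ls lp : List Char) (n : Nat) (j : Nat) (count : Nat) : Option Nat :=
  if _h : j < n then
    match PySem.List.pyGet? ls (j : Int), PySem.List.pyGet? lp (j : Int) with
    | some a, some b => if a = b then jadgeCount ls lp n (j + 1) (count + 1) else some count
    | _, _ => none
  else some count
termination_by n - j

-- outer loop: for i in range(len(s)): … ; fuel = len(s); falling off the end returns None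
def jadgeLoop (lp : List Char) (n : Nat) : Nat → List Char → Option Bool
  | 0, _ => none
  | f + 1, ls =>
    match jadgeCount ls lp n 0 0 with
    | none => none   -- IndexError (outside Pre_jadge)
    | some count =>
      if count = n then some true
      else
        match PySem.List.pop? ls 0 with
        | none => none   -- unreachable: ls nonempty whenever fuel > 0
        | some (head, rest) => jadgeLoop lp n f (rest ++ [head])

def jadge (s : String) (p : String) : Option Bool :=
  jadgeLoop p.toList p.toList.length s.toList.length s.toList

-- ===== PORT B =====
-- Source B: if s and p in s + s: return True   (falls off -> None)
def jadge_alt (s : String) (p : String) : Option Bool :=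
  if s.toList ≠ [] ∧ PySem.Chars.isIn p.toList (s.toList ++ s.toList) = true then some true
  else none

-- ===== PRECONDITION & SPEC =====
-- A raises IndexError exactly when p is strictly longer than a nonempty s and some
-- cyclic rotation of s is a prefix of p; Pre_ excludes exactly those inputs.
def Raises_jadge (s : String) (p : String) : Prop :=
  0 < s.toList.length ∧ s.toList.length < p.toList.length ∧
    ∃ i < s.toList.length, (s.toList.drop i ++ s.toList.take i) <+: p.toList
instance (s : String) (p : String) : Decidable (Raises_jadge s p) := by
  unfold Raises_jadge; infer_instance

def Pre_jadge (s : String) (p : String) : Prop := ¬ Raises_jadge s p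
instance (s : String) (p : String) : Decidable (Pre_jadge s p) := by unfold Pre_jadge; infer_instance

def pvWitness_jadge : String × String := ("ab", "b")

def pvRaiseWitness_jadge : String × String := ("a", "ab")
def pvRaiseWitnessOut_jadge : Option Bool := none

def Spec_jadge (s : String) (p : String) (out : Option Bool) : Prop := out = jadge_alt s p
instance (s : String) (p : String) (out : Option Bool) : Decidable (Spec_jadge s p out) := by unfold Spec_jadge; infer_instance

-- ===== CLAIM (what is proved, stated in full; the proofs are below) =====
def Claim_equal_jadge : Prop :=
  ∀ (s : String) (p : String), Dom_jadge s p → Pre_jadge s p → Spec_jadge s p (jadge s p)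

def Claim_raises_jadge : Prop :=
  (∀ (s : String) (p : String), Dom_jadge s p → Raises_jadge s p → ¬ Pre_jadge s p) ∧
  (Dom_jadge (pvRaiseWitness_jadge.1) (pvRaiseWitness_jadge.2) ∧
   Raises_jadge (pvRaiseWitness_jadge.1) (pvRaiseWitness_jadge.2) ∧
   jadge_alt (pvRaiseWitness_jadge.1) (pvRaiseWitness_jadge.2) = pvRaiseWitnessOut_jadge)

-- ===== LEMMAS AND PROOFS =====

-- rotation by i
def pvRot (l : List Char) (i : Nat) : List Char := l.drop i ++ l.take i

-- structural counterpart of jadgeCount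
def pvCmp : List Char → List Char → Nat → Option Nat
  | _, [], c => some c
  | [], _ :: _, _ => none
  | a :: as, b :: bs, c => if a = b then pvCmp as bs (c + 1) else some c

theorem pvCmp_nil_right (l : List Char) (c : Nat) : pvCmp l [] c = some c := by
  cases l <;> rfl

theorem pvCmp_bridge (ls lp : List Char) :
    ∀ j c, jadgeCount ls lp lp.length j c = pvCmp (ls.drop j) (lp.drop j) c := by
  intro j c
  induction hn : lp.length - j generalizing j c with
  | zero =>
    have hj : ¬ j < lp.length := by omega
    unfold jadgeCount
    simp only [hj, dite_false]
    rw [List.drop_eq_nil_of_le (show lp.length ≤ j by omega), pvCmp_nil_right]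
  | succ n ih =>
    have hj : j < lp.length := by omega
    unfold jadgeCount
    simp only [hj, dite_true]
    rw [PySem.List.pyGet?_natCast, PySem.List.pyGet?_natCast]
    by_cases hjs : j < ls.length
    · rw [List.drop_eq_getElem_cons hjs, List.drop_eq_getElem_cons hj]
      simp only [List.getElem?_eq_getElem hjs, List.getElem?_eq_getElem hj]
      by_cases he : ls[j] = lp[j]
      · rw [if_pos he, ih (j+1) (c+1) (by omega)]
        simp [pvCmp, he]
      · rw [if_neg he]
        simp [pvCmp, he]
    · rw [List.drop_eq_nil_of_le (show ls.length ≤ j by omega),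
          List.drop_eq_getElem_cons hj]
      rw [show ls[j]? = none from List.getElem?_eq_none_iff.mpr (by omega)]
      rfl

theorem pvCmp_of_prefix (ls lp : List Char) (c : Nat) (h : lp <+: ls) :
    pvCmp ls lp c = some (c + lp.length) := by
  induction lp generalizing ls c with
  | nil => simp [pvCmp]
  | cons b bs ih =>
    obtain ⟨t, rfl⟩ := h
    simp only [List.cons_append, pvCmp, if_true]
    rw [ih (bs ++ t) (c+1) ⟨t, rfl⟩]
    simp; omega

theorem pvCmp_of_mismatch (ls lp : List Char) (c : Nat)
    (h1 : ¬ lp <+: ls) (h2 : ¬ ls <+: lp) :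
    ∃ d, pvCmp ls lp c = some d ∧ d < c + lp.length := by
  induction lp generalizing ls c with
  | nil => exact absurd (List.nil_prefix) h1
  | cons b bs ih =>
    cases ls with
    | nil => exact absurd (List.nil_prefix) h2
    | cons a as =>
      by_cases he : a = b
      · subst he
        have h1' : ¬ bs <+: as := fun hp => h1 (List.cons_prefix_cons.mpr ⟨rfl, hp⟩)
        have h2' : ¬ as <+: bs := fun hp => h2 (List.cons_prefix_cons.mpr ⟨rfl, hp⟩)
        obtain ⟨d, hd, hlt⟩ := ih as (c+1) h1' h2'
        exact ⟨d, by simpa [pvCmp] using hd, by simp; omega⟩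
      · refine ⟨c, ?_, by simp⟩
        simp [pvCmp, fun h => he h]

theorem pvRot_succ (l : List Char) (k : Nat) (hk : k < l.length) :
    ∃ a t, l.drop k = a :: t ∧ pvRot l k = a :: (t ++ l.take k) ∧
      (t ++ l.take k) ++ [a] = pvRot l (k + 1) := by
  refine ⟨l[k], l.drop (k+1), List.drop_eq_getElem_cons hk, ?_, ?_⟩
  · unfold pvRot
    rw [List.drop_eq_getElem_cons hk, List.cons_append]
  · unfold pvRot
    rw [List.take_add_one, List.getElem?_eq_getElem hk]
    simp

theorem pvRot_length (l : List Char) (k : Nat) : (pvRot l k).length = l.length := by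
  simp [pvRot]; omega

theorem jadgeLoop_eq (ls0 lp : List Char)
    (hpre : ¬ (0 < ls0.length ∧ ls0.length < lp.length ∧
      ∃ i < ls0.length, (ls0.drop i ++ ls0.take i) <+: lp)) :
    ∀ f k, k + f = ls0.length →
      jadgeLoop lp lp.length f (pvRot ls0 k) =
        if ∃ i < ls0.length, k ≤ i ∧ lp <+: pvRot ls0 i then some true else none := by
  intro f
  induction f with
  | zero =>
    intro k hk
    rw [if_neg]
    · rfl
    · rintro ⟨i, hi, hki, -⟩; omega
  | succ f ih =>
    intro k hk
    have hkm : k < ls0.length := by omega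
    have hcnt := pvCmp_bridge (pvRot ls0 k) lp 0 0
    simp only [List.drop_zero] at hcnt
    by_cases hp : lp <+: pvRot ls0 k
    · rw [if_pos ⟨k, hkm, le_refl k, hp⟩]
      show jadgeLoop lp lp.length (f+1) (pvRot ls0 k) = some true
      unfold jadgeLoop
      rw [hcnt, pvCmp_of_prefix _ _ _ hp]
      simp
    · -- the non-matching rotation is not a prefix of p either (else A would raise / lengths force equality)
      have hnp : ¬ pvRot ls0 k <+: lp := by
        intro hrp
        by_cases hlen : ls0.length < lp.length
        · exact hpre ⟨by omega, hlen, k, hkm, by simpa [pvRot] using hrp⟩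
        · have h1 : lp.length ≤ ls0.length := by omega
          have h2 : (pvRot ls0 k).length ≤ lp.length := hrp.length_le
          rw [pvRot_length] at h2
          have : pvRot ls0 k = lp :=
            hrp.eq_of_length (by rw [pvRot_length]; omega)
          exact hp (this ▸ List.prefix_refl lp)
      obtain ⟨d, hd, hdlt⟩ := pvCmp_of_mismatch (pvRot ls0 k) lp 0 hp hnp
      obtain ⟨a, t, hdrop, hrotk, hrotk1⟩ := pvRot_succ ls0 k hkm
      show jadgeLoop lp lp.length (f+1) (pvRot ls0 k) = _
      unfold jadgeLoop
      rw [hcnt, hd, hrotk, PySem.List.pop?_zero_cons]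
      show (if d = lp.length then some true
            else jadgeLoop lp lp.length f ((t ++ List.take k ls0) ++ [a])) = _
      rw [if_neg (show ¬ d = lp.length by omega), hrotk1, ih (k+1) (by omega)]
      congr 1
      simp only [eq_iff_iff]
      constructor
      · rintro ⟨i, hi, hki, hip⟩; exact ⟨i, hi, by omega, hip⟩
      · rintro ⟨i, hi, hki, hip⟩
        refine ⟨i, hi, ?_, hip⟩
        rcases Nat.eq_or_lt_of_le hki with h | h
        · exact absurd (h ▸ hip) hp
        · omega

theorem pvDrop_append_self (ls0 : List Char) (i : Nat) (hi : i ≤ ls0.length) :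
    (ls0 ++ ls0).drop i = pvRot ls0 i ++ ls0.drop i := by
  rw [List.drop_append]
  have h0 : i - ls0.length = 0 := by omega
  rw [h0, List.drop_zero]
  unfold pvRot
  rw [List.append_assoc, List.take_append_drop]

theorem pvExists_rot_iff (ls0 lp : List Char) (hm : ls0 ≠ [])
    (hpre : ¬ (0 < ls0.length ∧ ls0.length < lp.length ∧
      ∃ i < ls0.length, (ls0.drop i ++ ls0.take i) <+: lp)) :
    (∃ i < ls0.length, 0 ≤ i ∧ lp <+: pvRot ls0 i) ↔
      PySem.Chars.isIn lp (ls0 ++ ls0) = true := by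
  have hm0 : 0 < ls0.length := List.length_pos_iff.mpr hm
  rw [← PySem.Chars.exists_prefix_drop_iff_isIn]
  constructor
  · rintro ⟨i, hi, -, hp⟩
    refine ⟨i, ?_⟩
    rw [pvDrop_append_self ls0 i (by omega)]
    exact hp.trans (List.prefix_append _ _)
  · rintro ⟨j, hj⟩
    by_cases hlp : lp = []
    · exact ⟨0, hm0, le_refl 0, hlp ▸ List.nil_prefix⟩
    have hjlt : j < ls0.length + ls0.length := by
      by_contra h
      rw [List.drop_eq_nil_of_le (by simpa using by omega)] at hj
      exact hlp (List.prefix_nil.mp hj)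
    have hlen : lp.length ≤ ls0.length + ls0.length - j := by
      have := hj.length_le
      simpa using this
    by_cases hjm : j < ls0.length
    · -- occurrence starts in the first copy
      have hrp : pvRot ls0 j <+: (ls0 ++ ls0).drop j :=
        pvDrop_append_self ls0 j (by omega) ▸ List.prefix_append _ _
      by_cases hnm : lp.length ≤ ls0.length
      · rcases List.prefix_or_prefix_of_prefix hj hrp with h | h
        · exact ⟨j, hjm, Nat.zero_le j, h⟩
        · have hle := h.length_le
          rw [pvRot_length] at hle
          have heq : pvRot ls0 j = lp :=
            h.eq_of_length (by rw [pvRot_length]; omega)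
          exact ⟨j, hjm, Nat.zero_le j, heq ▸ List.prefix_refl _⟩
      · -- |p| > |s|: the rotation would be a prefix of p, excluded by hpre
        exfalso
        rcases List.prefix_or_prefix_of_prefix hj hrp with h | h
        · have hLe := h.length_le
          rw [pvRot_length] at hLe; omega
        · exact hpre ⟨hm0, by omega, j, hjm, by simpa [pvRot] using h⟩
    · -- occurrence starts in the second copy: shift back by |s|
      have hi : j - ls0.length < ls0.length := by omega
      have hdrop : (ls0 ++ ls0).drop j = ls0.drop (j - ls0.length) := by
        rw [List.drop_append, List.drop_eq_nil_of_le (by omega), List.nil_append]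
      rw [hdrop] at hj
      refine ⟨j - ls0.length, hi, Nat.zero_le _, hj.trans ?_⟩
      exact List.prefix_append _ _

-- ===== VERDICT (by name: the statement is the Claim_ definition above) =====
theorem jadge_spec : Claim_equal_jadge := by
  intro s p _hdom hpre
  unfold Pre_jadge Raises_jadge at hpre
  unfold Spec_jadge jadge jadge_alt
  have hrot0 : s.toList = pvRot s.toList 0 := by simp [pvRot]
  rw [show jadgeLoop p.toList p.toList.length s.toList.length s.toList
        = jadgeLoop p.toList p.toList.length s.toList.length (pvRot s.toList 0) from by
        rw [← hrot0]]
  rw [jadgeLoop_eq s.toList p.toList hpre s.toList.length 0 (by omega)]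
  by_cases hm : s.toList = []
  · simp [hm]
  · have hiff := pvExists_rot_iff s.toList p.toList hm hpre
    by_cases hin : PySem.Chars.isIn p.toList (s.toList ++ s.toList) = true
    · rw [if_pos (hiff.mpr hin), if_pos ⟨hm, hin⟩]
    · rw [if_neg (fun h => hin (hiff.mp h)), if_neg (fun h => hin h.2)]

@[simp] theorem jadge_raises : Claim_raises_jadge := by
  unfold Claim_raises_jadge
  exact ⟨fun s p _ h hp => hp h, by decide⟩
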